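-- pv_equiv track=rewrite | github.com/fiifi-dev/python-cryptography-notes | ch1-introduction/sln1.1.py | create_shift_substitions
-- ===== SOURCE A (Python) =====
-- from string import ascii_uppercase
--
-- def create_shift_substitions(n: int):
--     encoding = {}
--     decoding = {}
--
--     alphabet_size = len(ascii_uppercase)
--
--     for i in range(len(ascii_uppercase)):
--         letter = ascii_uppercase[i]
--         subt_letter = ascii_uppercase[(i+n) % alphabet_size]
--         encoding[letter] = subt_letter
--         decoding[subt_letter] = letter
--
--     return encoding, decoding
-- ===== SOURCE B (Python) =====
-- from string import ascii_uppercase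
--
-- def create_shift_substitions(n: int):
--     # Rotate the alphabet as a queue: move the front letter to the back n % 26 times,
--     # then pair the original alphabet with the rotated one (and the reverse pairing).
--     letters = list(ascii_uppercase)
--     for _ in range(n % 26):
--         letters.append(letters.pop(0))
--     encoding = dict(zip(ascii_uppercase, letters))
--     decoding = dict(zip(letters, ascii_uppercase))
--     return encoding, decoding
-- ===== Notes on version B (the rewrite author's own statement) =====
-- stated objective: alternative
-- what changed: B never computes a shifted index: it rotates the alphabet as a queue (pop front, append back, once per unit of the shift reduced modulo the alphabet size) and then builds each dictionary directly as dict(zip(...)) of the two alphabets, instead of A's single lockstep loop inserting into both dicts via modular index arithmetic.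
import Mathlib
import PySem

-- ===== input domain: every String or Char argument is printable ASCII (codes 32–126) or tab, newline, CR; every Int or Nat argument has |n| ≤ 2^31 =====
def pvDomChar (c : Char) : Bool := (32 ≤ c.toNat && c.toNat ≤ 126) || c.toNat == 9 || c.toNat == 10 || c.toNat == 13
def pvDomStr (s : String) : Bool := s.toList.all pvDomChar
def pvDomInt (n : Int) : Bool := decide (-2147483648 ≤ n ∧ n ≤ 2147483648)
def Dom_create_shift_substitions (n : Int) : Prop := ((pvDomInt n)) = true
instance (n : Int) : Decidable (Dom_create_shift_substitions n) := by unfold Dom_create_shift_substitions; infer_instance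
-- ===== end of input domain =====

-- B rotates the alphabet as a queue (pop front, append back, n % 26 times) and builds each
-- dictionary directly as a zip of the two alphabets, instead of A's lockstep loop inserting
-- into both dicts via (i+n) % 26 index arithmetic; objective: alternative.

def pvUpper : String := "ABCDEFGHIJKLMNOPQRSTUVWXYZ"

-- ===== PORT A =====
-- loop body of A: letter = s[i]; subt_letter = s[(i+n) % alphabet_size];
-- encoding[letter] = subt_letter; decoding[subt_letter] = letter
-- (the indices are always in range, so pyGet? is always `some`; Option.toList turns it into the 1-char string)
def pvStepA (n : Int) (st : PySem.Dict String String × PySem.Dict String String) (i : Int) :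
    PySem.Dict String String × PySem.Dict String String :=
  let letter := String.ofList (PySem.Str.pyGet? pvUpper i).toList
  let subt_letter := String.ofList (PySem.Str.pyGet? pvUpper (PySem.Int.mod (i + n) (PySem.Str.len pvUpper))).toList
  (st.1.insert letter subt_letter, st.2.insert subt_letter letter)

def create_shift_substitions (n : Int) : (List (String × String)) × (List (String × String)) :=
  let res := (PySem.List.pyRange 0 (PySem.Str.len pvUpper) 1).foldl (pvStepA n)
    (PySem.Dict.empty, PySem.Dict.empty)
  (res.1.items, res.2.items)

-- ===== PORT B =====
-- letters.append(letters.pop(0)); the list is always nonempty here, so pop? is always `some`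
-- (the `none` branch is only a totality guard, never reached)
def pvRotStep (l : List Char) : List Char :=
  match PySem.List.pop? l 0 with
  | some (x, rest) => rest ++ [x]
  | none => l

def create_shift_substitions_alt (n : Int) : (List (String × String)) × (List (String × String)) :=
  let letters := (PySem.List.pyRange 0 (PySem.Int.mod n 26) 1).foldl (fun l _ => pvRotStep l) pvUpper.toList
  let encoding := PySem.Dict.ofList ((pvUpper.toList.zip letters).map (fun p => (String.ofList [p.1], String.ofList [p.2])))
  let decoding := PySem.Dict.ofList ((letters.zip pvUpper.toList).map (fun p => (String.ofList [p.1], String.ofList [p.2])))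
  (encoding.items, decoding.items)

-- ===== PRECONDITION & SPEC =====
def Spec_create_shift_substitions (n : Int) (out : (List (String × String)) × (List (String × String))) : Prop := out = create_shift_substitions_alt n
instance (n : Int) (out : (List (String × String)) × (List (String × String))) : Decidable (Spec_create_shift_substitions n out) := by unfold Spec_create_shift_substitions; infer_instance

-- ===== CLAIM (what is proved, stated in full; the proofs are below) =====
def Claim_equal_create_shift_substitions : Prop := ∀ (n : Int), Dom_create_shift_substitions n → Spec_create_shift_substitions n (create_shift_substitions n)

-- ===== LEMMAS AND PROOFS =====

-- proof-only abbreviations for the two letter selectors of A's loop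
def pvSgl (c : Char) : String := String.ofList [c]
def pvL (i : Int) : String := String.ofList (PySem.Str.pyGet? pvUpper i).toList
def pvS (n i : Int) : String := String.ofList (PySem.Str.pyGet? pvUpper (PySem.Int.mod (i + n) (PySem.Str.len pvUpper))).toList

theorem pvHLen : PySem.Str.len pvUpper = 26 := by decide

theorem pvRangeLit : PySem.List.pyRange 0 26 1 = [0,1,2,3,4,5,6,7,8,9,10,11,12,13,14,15,16,17,18,19,20,21,22,23,24,25] := by
  rw [PySem.List.pyRange_one]; decide

-- indexing a suffix / prefix through getElem?
theorem pvAuxDrop {α : Type} (l : List α) (m : Nat) (hm : m ≤ l.length) :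
    (List.range (l.length - m)).map (fun k => l[k + m]?) = (l.drop m).map some := by
  apply List.ext_getElem?
  intro j
  by_cases hj : j < l.length - m
  · have h1 : j + m < l.length := by omega
    have h2 : m + j < l.length := by omega
    simp [hj, h1]
    congr 1
    omega
  · rw [List.getElem?_eq_none_iff.2 (by simp only [List.length_map, List.length_range]; omega),
        List.getElem?_eq_none_iff.2 (by simp only [List.length_map, List.length_drop]; omega)]

theorem pvAuxTake {α : Type} (l : List α) (m : Nat) (hm : m ≤ l.length) :
    (List.range m).map (fun k => l[k]?) = (l.take m).map some := by
  apply List.ext_getElem?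
  intro j
  by_cases hj : j < m
  · have h1 : j < l.length := by omega
    simp [hj, h1]
  · rw [List.getElem?_eq_none_iff.2 (by simp only [List.length_map, List.length_range]; omega),
        List.getElem?_eq_none_iff.2 (by simp only [List.length_map, List.length_take]; omega)]

-- the heart of the A side: A's shifted-letter selector over range(26) is the rotation by n % 26
theorem pvC (n : Int) :
    (PySem.List.pyRange 0 26 1).map (fun i => PySem.Str.pyGet? pvUpper (PySem.Int.mod (i + n) 26))
      = (pvUpper.toList.drop (PySem.Int.mod n 26).toNat ++ pvUpper.toList.take (PySem.Int.mod n 26).toNat).map some := by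
  have h26 : (0 : Int) < 26 := by omega
  have hr0 : 0 ≤ PySem.Int.mod n 26 := PySem.Int.mod_nonneg n h26
  have hr1 : PySem.Int.mod n 26 < 26 := PySem.Int.mod_lt n h26
  set r := PySem.Int.mod n 26 with hrdef
  set m := r.toNat with hmdef
  have hrm : r = (m : Int) := by omega
  have hulen : pvUpper.toList.length = 26 := by decide
  have hcong : ∀ i ∈ PySem.List.pyRange 0 26 1,
      PySem.Str.pyGet? pvUpper (PySem.Int.mod (i + n) 26) = PySem.Str.pyGet? pvUpper (PySem.Int.mod (i + r) 26) := by
    intro i _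
    congr 1
    rw [hrdef]
    rw [PySem.Int.mod_eq_emod_of_pos h26, PySem.Int.mod_eq_emod_of_pos h26, PySem.Int.mod_eq_emod_of_pos h26]
    omega
  rw [List.map_congr_left hcong]
  rw [PySem.List.pyRange_one_append 0 (26 - r) 26 (by omega) (by omega), List.map_append, List.map_append]
  congr 1
  · -- i ∈ [0, 26 - r): (i + r) % 26 = i + r
    have h2 : ∀ i ∈ PySem.List.pyRange 0 (26 - r) 1,
        PySem.Str.pyGet? pvUpper (PySem.Int.mod (i + r) 26) = PySem.Str.pyGet? pvUpper (i + r) := by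
      intro i hi
      rw [PySem.List.mem_pyRange_one] at hi
      congr 1
      rw [PySem.Int.mod_eq_emod_of_pos h26]
      omega
    rw [List.map_congr_left h2, PySem.List.pyRange_one, List.map_map, sub_zero]
    have h3 : ∀ k ∈ List.range (26 - r).toNat,
        ((fun i => PySem.Str.pyGet? pvUpper (i + r)) ∘ fun k : Nat => (0 : Int) + ↑k) k
          = pvUpper.toList[k + m]? := by
      intro k _
      show PySem.Str.pyGet? pvUpper ((0 : Int) + ↑k + r) = _
      rw [show ((0 : Int) + ↑k + r) = ((k + m : Nat) : Int) by omega]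
      exact PySem.Str.pyGet?_natCast pvUpper (k + m)
    rw [List.map_congr_left h3, show (26 - r).toNat = pvUpper.toList.length - m by omega]
    exact pvAuxDrop pvUpper.toList m (by omega)
  · -- i ∈ [26 - r, 26): (i + r) % 26 = i + r - 26
    rw [PySem.List.pyRange_one, List.map_map]
    have h4 : ∀ k ∈ List.range (26 - (26 - r)).toNat,
        ((fun i => PySem.Str.pyGet? pvUpper (PySem.Int.mod (i + r) 26)) ∘ fun k : Nat => (26 - r) + ↑k) k
          = pvUpper.toList[k]? := by
      intro k hk
      rw [List.mem_range] at hk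
      show PySem.Str.pyGet? pvUpper (PySem.Int.mod ((26 - r) + ↑k + r) 26) = _
      rw [show PySem.Int.mod ((26 - r) + ↑k + r) 26 = ((k : Nat) : Int) by
        rw [PySem.Int.mod_eq_emod_of_pos h26]; omega]
      exact PySem.Str.pyGet?_natCast pvUpper k
    rw [List.map_congr_left h4, show (26 - (26 - r)).toNat = m by omega]
    exact pvAuxTake pvUpper.toList m (by omega)

-- items of a dict built by inserting distinct fresh keys
theorem pvItemsFold (l : List Int) (k v : Int → String) (hn : (l.map k).Nodup) :
    (List.foldl (fun d i => d.insert (k i) (v i)) PySem.Dict.empty l).items = l.map (fun i => (k i, v i)) := by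
  have h := PySem.Dict.items_foldl_insert_fresh l k v PySem.Dict.empty (fun a _ => by simp) hn
  simpa using h

theorem pvItemsOfList {κ ν : Type} [BEq κ] [LawfulBEq κ] (ps : List (κ × ν)) (h : (ps.map Prod.fst).Nodup) :
    (PySem.Dict.ofList ps).items = ps := by
  have h2 := PySem.Dict.items_foldl_insert_fresh ps Prod.fst Prod.snd PySem.Dict.empty (fun a _ => by simp) h
  simpa [PySem.Dict.ofList, PySem.Dict.update] using h2

-- A's two selectors over range(26), as maps of the alphabet
theorem pvE1 : (PySem.List.pyRange 0 26 1).map pvL = pvUpper.toList.map pvSgl := by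
  rw [pvRangeLit]; decide

theorem pvE2 (n : Int) :
    (PySem.List.pyRange 0 26 1).map (pvS n)
      = (pvUpper.toList.drop (PySem.Int.mod n 26).toNat ++ pvUpper.toList.take (PySem.Int.mod n 26).toNat).map pvSgl := by
  have h := congrArg (List.map (fun o : Option Char => String.ofList o.toList)) (pvC n)
  rw [List.map_map, List.map_map] at h
  have h1 : ∀ i ∈ PySem.List.pyRange 0 26 1,
      ((fun o : Option Char => String.ofList o.toList) ∘ fun i => PySem.Str.pyGet? pvUpper (PySem.Int.mod (i + n) 26)) i = pvS n i := by
    intro i _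
    simp only [Function.comp_apply]
    unfold pvS
    rw [pvHLen]
  have h2 : ∀ c ∈ pvUpper.toList.drop (PySem.Int.mod n 26).toNat ++ pvUpper.toList.take (PySem.Int.mod n 26).toNat,
      ((fun o : Option Char => String.ofList o.toList) ∘ some) c = pvSgl c := by
    intro c _; rfl
  rw [List.map_congr_left h1, List.map_congr_left h2] at h
  exact h

theorem pvNodupAlphabet : (pvUpper.toList.map pvSgl).Nodup := by decide

theorem pvRotPerm (m : Nat) : (pvUpper.toList.drop m ++ pvUpper.toList.take m).Perm pvUpper.toList := by
  calc (pvUpper.toList.drop m ++ pvUpper.toList.take m).Perm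
        (pvUpper.toList.take m ++ pvUpper.toList.drop m) := List.perm_append_comm
    _ = pvUpper.toList := List.take_append_drop m pvUpper.toList

theorem pvNodupRot (m : Nat) : ((pvUpper.toList.drop m ++ pvUpper.toList.take m).map pvSgl).Nodup :=
  (((pvRotPerm m).map pvSgl).nodup_iff).2 pvNodupAlphabet

-- A's result in closed map form
theorem pvAitems (n : Int) :
    create_shift_substitions n
      = ((PySem.List.pyRange 0 26 1).map (fun i => (pvL i, pvS n i)),
         (PySem.List.pyRange 0 26 1).map (fun i => (pvS n i, pvL i))) := by
  show ((List.foldl (fun (st : PySem.Dict String String × PySem.Dict String String) i =>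
          (st.1.insert (pvL i) (pvS n i), st.2.insert (pvS n i) (pvL i)))
          (PySem.Dict.empty, PySem.Dict.empty) (PySem.List.pyRange 0 (PySem.Str.len pvUpper) 1)).1.items,
        (List.foldl (fun (st : PySem.Dict String String × PySem.Dict String String) i =>
          (st.1.insert (pvL i) (pvS n i), st.2.insert (pvS n i) (pvL i)))
          (PySem.Dict.empty, PySem.Dict.empty) (PySem.List.pyRange 0 (PySem.Str.len pvUpper) 1)).2.items) = _
  rw [pvHLen]
  rw [PySem.List.foldl_prod_mk (fun (d : PySem.Dict String String) i => d.insert (pvL i) (pvS n i))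
    (fun (d : PySem.Dict String String) i => d.insert (pvS n i) (pvL i))
    (PySem.List.pyRange 0 26 1) PySem.Dict.empty PySem.Dict.empty]
  have hnL : ((PySem.List.pyRange 0 26 1).map pvL).Nodup := by
    rw [pvE1]; exact pvNodupAlphabet
  have hnS : ((PySem.List.pyRange 0 26 1).map (pvS n)).Nodup := by
    rw [pvE2]; exact pvNodupRot _
  rw [pvItemsFold _ pvL (pvS n) hnL, pvItemsFold _ (pvS n) pvL hnS]

-- B side: a fold that ignores its list elements is an iterate of the step function
theorem pvFoldIter {α β : Type} (f : α → α) (l : List β) (init : α) :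
    l.foldl (fun a _ => f a) init = f^[l.length] init := by
  induction l generalizing init with
  | nil => rfl
  | cons x xs ih => simp [List.foldl_cons, ih, Function.iterate_succ_apply]

-- one queue rotation of drop j ++ take j is drop (j+1) ++ take (j+1)
theorem pvRotStepDropTake (j : Nat) (hj : j < pvUpper.toList.length) :
    pvRotStep (pvUpper.toList.drop j ++ pvUpper.toList.take j)
      = pvUpper.toList.drop (j + 1) ++ pvUpper.toList.take (j + 1) := by
  rw [List.drop_eq_getElem_cons hj]
  show pvRotStep (pvUpper.toList[j] :: (pvUpper.toList.drop (j + 1) ++ pvUpper.toList.take j)) = _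
  unfold pvRotStep
  rw [PySem.List.pop?_zero_cons]
  show (pvUpper.toList.drop (j + 1) ++ pvUpper.toList.take j) ++ [pvUpper.toList[j]] = _
  rw [List.append_assoc, List.take_add_one]
  congr 2
  rw [List.getElem?_eq_getElem hj]
  rfl

-- iterating the queue rotation m times rotates the alphabet by m
theorem pvIterRot (m : Nat) (hm : m ≤ pvUpper.toList.length) :
    pvRotStep^[m] pvUpper.toList = pvUpper.toList.drop m ++ pvUpper.toList.take m := by
  induction m with
  | zero => simp
  | succ j ih =>
    rw [Function.iterate_succ_apply', ih (by omega), pvRotStepDropTake j (by omega)]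

set_option maxHeartbeats 1000000 in
theorem create_shift_substitions_spec : Claim_equal_create_shift_substitions := by
  unfold Claim_equal_create_shift_substitions Spec_create_shift_substitions
  intro n _
  have h26 : (0 : Int) < 26 := by omega
  have hr0 : 0 ≤ PySem.Int.mod n 26 := PySem.Int.mod_nonneg n h26
  have hr1 : PySem.Int.mod n 26 < 26 := PySem.Int.mod_lt n h26
  have hulen : pvUpper.toList.length = 26 := by decide
  set m := (PySem.Int.mod n 26).toNat with hmdef
  set rot := pvUpper.toList.drop m ++ pvUpper.toList.take m with hrotdef
  have hrotlen : rot.length = 26 := by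
    rw [hrotdef, List.length_append, List.length_drop, List.length_take, hulen]
    omega
  -- B's rotated letters are rot
  have hletters : (PySem.List.pyRange 0 (PySem.Int.mod n 26) 1).foldl (fun l _ => pvRotStep l) pvUpper.toList = rot := by
    rw [pvFoldIter pvRotStep, PySem.List.length_pyRange_one]
    rw [show (PySem.Int.mod n 26 - 0).toNat = m by omega]
    exact pvIterRot m (by omega)
  -- zipped pairs, componentwise
  have hpairs1 : (pvUpper.toList.zip rot).map (fun p => (String.ofList [p.1], String.ofList [p.2]))
      = ((pvUpper.toList.map pvSgl).zip (rot.map pvSgl)) := by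
    rw [List.zip_map]
    apply List.map_congr_left
    intro p _
    rfl
  have hpairs2 : (rot.zip pvUpper.toList).map (fun p => (String.ofList [p.1], String.ofList [p.2]))
      = ((rot.map pvSgl).zip (pvUpper.toList.map pvSgl)) := by
    rw [List.zip_map]
    apply List.map_congr_left
    intro p _
    rfl
  have hkeys1 : (((pvUpper.toList.zip rot).map (fun p => (String.ofList [p.1], String.ofList [p.2]))).map Prod.fst).Nodup := by
    rw [hpairs1, List.map_fst_zip]
    · exact pvNodupAlphabet
    · simp [hrotlen, hulen]
  have hkeys2 : (((rot.zip pvUpper.toList).map (fun p => (String.ofList [p.1], String.ofList [p.2]))).map Prod.fst).Nodup := by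
    rw [hpairs2, List.map_fst_zip]
    · exact pvNodupRot m
    · simp [hrotlen, hulen]
  have henc : (PySem.Dict.ofList ((pvUpper.toList.zip rot).map (fun p => (String.ofList [p.1], String.ofList [p.2])))).items
      = (pvUpper.toList.map pvSgl).zip (rot.map pvSgl) := by
    rw [pvItemsOfList _ hkeys1, hpairs1]
  have hdec : (PySem.Dict.ofList ((rot.zip pvUpper.toList).map (fun p => (String.ofList [p.1], String.ofList [p.2])))).items
      = (rot.map pvSgl).zip (pvUpper.toList.map pvSgl) := by
    rw [pvItemsOfList _ hkeys2, hpairs2]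
  -- put B into closed form
  unfold create_shift_substitions_alt
  simp only [hletters, henc, hdec]
  -- put A into closed form and compare componentwise
  rw [pvAitems n]
  refine Prod.ext ?_ ?_
  · show (PySem.List.pyRange 0 26 1).map (fun i => (pvL i, pvS n i)) = _
    rw [show (PySem.List.pyRange 0 26 1).map (fun i => (pvL i, pvS n i))
        = ((PySem.List.pyRange 0 26 1).map pvL).zip ((PySem.List.pyRange 0 26 1).map (pvS n)) from List.zip_map'.symm]
    rw [pvE1, pvE2, ← hmdef, ← hrotdef]
  · show (PySem.List.pyRange 0 26 1).map (fun i => (pvS n i, pvL i)) = _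
    rw [show (PySem.List.pyRange 0 26 1).map (fun i => (pvS n i, pvL i))
        = ((PySem.List.pyRange 0 26 1).map (pvS n)).zip ((PySem.List.pyRange 0 26 1).map pvL) from List.zip_map'.symm]
    rw [pvE2, pvE1, ← hmdef, ← hrotdef]
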